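-- pv_equiv track=rewrite | github.com/ReadyForAI/LarkScout | services/docreader/larkscout_docreader.py | _toc_has_dense_same_page_entries
-- ===== SOURCE A (Python) =====
-- def _toc_has_dense_same_page_entries(toc: list) -> bool:
--     page_counts: dict[int, int] = {}
--     for entry in toc:
--         try:
--             level, _title, page_num = entry
--         except ValueError:
--             continue
--         if int(level) > 2:
--             continue
--         page_counts[int(page_num)] = page_counts.get(int(page_num), 0) + 1
--     return any(count > 1 for count in page_counts.values())
-- ===== SOURCE B (Python) =====
-- def _toc_has_dense_same_page_entries(toc: list) -> bool:
--     # Sort-based duplicate detection: collect low-level pages, sort them,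
--     # and check whether any two adjacent sorted values are equal.
--     pages = []
--     for entry in toc:
--         try:
--             level, _title, page_num = entry
--         except ValueError:
--             continue
--         if int(level) > 2:
--             continue
--         pages.append(int(page_num))
--     pages = sorted(pages)
--     return any(a == b for a, b in zip(pages, pages[1:]))
-- ===== Notes on version B (the rewrite author's own statement) =====
-- stated objective: alternative
-- what changed: Replaces A's hash-count dict plus separate any(count>1) scan with sort-based duplicate detection: collect the low-level page numbers, sort them, and test whether any adjacent pair in the sorted list is equal.
import Mathlib
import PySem

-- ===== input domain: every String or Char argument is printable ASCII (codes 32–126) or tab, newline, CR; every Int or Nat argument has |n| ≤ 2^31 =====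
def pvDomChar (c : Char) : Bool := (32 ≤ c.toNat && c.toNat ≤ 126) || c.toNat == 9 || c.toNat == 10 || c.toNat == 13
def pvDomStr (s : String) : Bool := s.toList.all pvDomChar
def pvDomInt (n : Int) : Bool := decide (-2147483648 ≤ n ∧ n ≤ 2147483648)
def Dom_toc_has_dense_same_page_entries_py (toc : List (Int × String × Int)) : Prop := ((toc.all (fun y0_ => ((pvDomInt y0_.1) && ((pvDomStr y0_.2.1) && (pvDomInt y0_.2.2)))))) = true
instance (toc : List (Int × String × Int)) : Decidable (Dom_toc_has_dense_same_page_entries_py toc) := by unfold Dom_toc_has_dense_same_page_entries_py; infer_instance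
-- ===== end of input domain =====

-- B replaces A's count-dict-then-scan-values approach with sort-based duplicate detection (collect pages, sort, compare adjacent); alternative algorithm, same return value.


-- ===== PORT A =====
-- Entries are always 3-tuples here, so the 'except ValueError: continue' branch never fires;
-- int(level)/int(page_num) are identities on Int.
def toc_has_dense_same_page_entries_py (toc : List (Int × String × Int)) : Bool :=
  let page_counts : PySem.Dict Int Int :=
    toc.foldl (fun d e =>
      if e.1 > 2 then d
      else d.insert e.2.2 (d.getD e.2.2 0 + 1)) PySem.Dict.empty
  (PySem.Dict.values page_counts).any (fun count => decide (count > 1))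

-- ===== PORT B =====
def toc_has_dense_same_page_entries_py_alt (toc : List (Int × String × Int)) : Bool :=
  let pages : List Int :=
    toc.foldl (fun acc e => if e.1 > 2 then acc else acc ++ [e.2.2]) []
  let pages := PySem.List.sorted pages (fun x => x) false
  (pages.zip (PySem.List.slice pages (some 1) none)).any (fun p => decide (p.1 = p.2))

-- ===== PRECONDITION & SPEC =====
def Spec_toc_has_dense_same_page_entries_py (toc : List (Int × String × Int)) (out : Bool) : Prop := out = toc_has_dense_same_page_entries_py_alt toc
instance (toc : List (Int × String × Int)) (out : Bool) : Decidable (Spec_toc_has_dense_same_page_entries_py toc out) := by unfold Spec_toc_has_dense_same_page_entries_py; infer_instance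

-- ===== CLAIM (what is proved, stated in full; the proofs are below) =====
def Claim_equal_toc_has_dense_same_page_entries_py : Prop := ∀ (toc : List (Int × String × Int)), Dom_toc_has_dense_same_page_entries_py toc → Spec_toc_has_dense_same_page_entries_py toc (toc_has_dense_same_page_entries_py toc)

-- ===== LEMMAS AND PROOFS =====

-- the low-level (level ≤ 2) page numbers, in order
def tocPages (toc : List (Int × String × Int)) : List Int :=
  (toc.filter (fun e => !(e.1 > 2))).map (fun e => e.2.2)

lemma foldl_skip_eq_pages (toc : List (Int × String × Int)) (d : PySem.Dict Int Int) :
    toc.foldl (fun d e =>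
      if e.1 > 2 then d
      else d.insert e.2.2 (d.getD e.2.2 0 + 1)) d
    = (tocPages toc).foldl (fun d x => d.insert x (d.getD x 0 + 1)) d := by
  induction toc generalizing d with
  | nil => rfl
  | cons e rest ih =>
    by_cases h : e.1 > 2 <;>
      simp [tocPages, h, ih]

lemma portA_eq_nodup (toc : List (Int × String × Int)) :
    toc_has_dense_same_page_entries_py toc = decide ¬ (tocPages toc).Nodup := by
  unfold toc_has_dense_same_page_entries_py
  rw [foldl_skip_eq_pages, PySem.Dict.foldl_insert_getD_add_one_eq_counter]
  rw [Bool.eq_iff_iff]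
  simp only [List.any_eq_true, decide_eq_true_eq]
  constructor
  · rintro ⟨c, hc, hgt⟩
    have : c ∈ (PySem.Dict.counter (tocPages toc)).items.map (·.2) := hc
    rw [PySem.Dict.items_counter] at this
    simp only [List.map_map, List.mem_map, Function.comp] at this
    obtain ⟨k, _, rfl⟩ := this
    intro hnd
    have := (List.nodup_iff_count_le_one.mp hnd) k
    omega
  · intro hnd
    rw [List.nodup_iff_count_le_one] at hnd
    rw [not_forall] at hnd
    simp only [not_le] at hnd
    obtain ⟨k, hk⟩ := hnd
    refine ⟨((tocPages toc).count k : Int), ?_, by exact_mod_cast hk⟩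
    show _ ∈ (PySem.Dict.counter (tocPages toc)).items.map (·.2)
    rw [PySem.Dict.items_counter]
    simp only [List.map_map, List.mem_map, Function.comp]
    refine ⟨k, ?_, rfl⟩
    rw [PySem.Set.mem_ofList]
    exact List.count_pos_iff.mp (by omega)

lemma foldl_append_eq_pages (toc : List (Int × String × Int)) (acc : List Int) :
    toc.foldl (fun acc e => if e.1 > 2 then acc else acc ++ [e.2.2]) acc
    = acc ++ tocPages toc := by
  induction toc generalizing acc with
  | nil => simp [tocPages]
  | cons e rest ih =>
    by_cases h : e.1 > 2 <;> simp [tocPages, h, ih]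

-- on an ≤-sorted list, some adjacent pair is equal iff the list has a duplicate
lemma adj_dup_eq_nodup (s : List Int) (hs : s.Pairwise (· ≤ ·)) :
    ((s.zip s.tail).any (fun p => decide (p.1 = p.2))) = decide ¬ s.Nodup := by
  induction s with
  | nil => simp
  | cons a t ih =>
    cases t with
    | nil => simp
    | cons b u =>
      have hpw : (b :: u).Pairwise (· ≤ ·) := hs.tail
      by_cases hab : a = b
      · subst hab
        simp [List.zip]
      · have hne : (decide (a = b)) = false := by simp [hab]
        have hrec := ih hpw
        have hamem : a ∉ b :: u := by
          intro hmem
          rcases List.mem_cons.mp hmem with h | h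
          · exact hab h
          · have hab' : a ≤ b := (List.pairwise_cons.mp hs).1 b (by simp)
            have hbu : b ≤ a := (List.pairwise_cons.mp hpw).1 a h
            exact hab (le_antisymm hab' hbu)
        simp only [List.tail, List.zip_cons_cons, List.any_cons, hne, Bool.false_or]
        rw [show (b :: u).tail = u from rfl] at hrec
        rw [hrec, Bool.eq_iff_iff]
        simp [List.nodup_cons, hamem]

lemma portB_eq_nodup (toc : List (Int × String × Int)) :
    toc_has_dense_same_page_entries_py_alt toc = decide ¬ (tocPages toc).Nodup := by
  unfold toc_has_dense_same_page_entries_py_alt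
  rw [foldl_append_eq_pages, List.nil_append]
  simp only []
  rw [PySem.List.slice_from_one, adj_dup_eq_nodup _ (PySem.List.sorted_pairwise (tocPages toc) (fun x => x) )]
  have hperm : (PySem.List.sorted (tocPages toc) (fun x => x) false).Perm (tocPages toc) :=
    PySem.List.sorted_perm _ _ _
  simp [hperm.nodup_iff]

-- ===== VERDICT (by name: the statement is the Claim_ definition above) =====
theorem toc_has_dense_same_page_entries_py_spec : Claim_equal_toc_has_dense_same_page_entries_py := by
  intro toc _
  unfold Spec_toc_has_dense_same_page_entries_py
  rw [portA_eq_nodup, portB_eq_nodup]
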